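-- pv_equiv track=rewrite | github.com/microsoft/vscode | src/vs/platform/snc/node/visualizers/string_visualizer.py | strip_capturing_groups
-- ===== SOURCE A (Python) =====
-- def strip_capturing_groups(pattern: str) -> str:
--     """
--     Strip any remaining capturing groups from a pattern, leaving just the inner content.
--
--     For example: "hello(.*)world" -> "hello.*world"
--                  "(hello)(world)" -> "helloworld"
--
--     Used when generating re.search() code, where groups are not needed.
--     """
--     result = []
--     i = 0
--     while i < len(pattern):
--         if pattern[i] == '(':
--             # Skip the opening paren
--             i += 1
--         elif pattern[i] == ')':
--             # Skip the closing paren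
--             i += 1
--         elif pattern[i] == '\\' and i + 1 < len(pattern):
--             # Escaped character - keep both
--             result.append(pattern[i:i+2])
--             i += 2
--         else:
--             result.append(pattern[i])
--             i += 1
--     return ''.join(result)
-- ===== SOURCE B (Python) =====
-- import re
--
-- def strip_capturing_groups(pattern: str) -> str:
--     # Single regex substitution: escaped pairs (tried first) are kept whole,
--     # bare parens are deleted; a trailing lone backslash matches neither branch.
--     return re.sub(r'\\.|[()]', lambda m: '' if m.group(0) in '()' else m.group(0), pattern, flags=re.DOTALL)
-- ===== Notes on version B (the rewrite author's own statement) =====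
-- stated objective: idiomatic
-- what changed: Replaces the manual index/while loop with a single re.sub over the alternation \\.|[()], using a function replacement that deletes bare parens and keeps escaped pairs intact.
import Mathlib
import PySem

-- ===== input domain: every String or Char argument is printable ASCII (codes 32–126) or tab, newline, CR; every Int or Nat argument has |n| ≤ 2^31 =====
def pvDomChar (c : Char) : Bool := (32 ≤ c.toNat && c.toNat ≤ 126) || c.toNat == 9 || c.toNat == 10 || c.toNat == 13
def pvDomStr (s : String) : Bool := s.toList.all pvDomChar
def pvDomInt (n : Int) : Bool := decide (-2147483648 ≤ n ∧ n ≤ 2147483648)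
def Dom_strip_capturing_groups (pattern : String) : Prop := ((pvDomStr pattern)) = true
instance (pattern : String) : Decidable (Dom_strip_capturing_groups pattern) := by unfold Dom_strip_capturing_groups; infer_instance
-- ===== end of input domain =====

-- B replaces A's index-driven while loop by one regex substitution (re.sub over '\\.|[()]'
-- with a function replacement); same values, objective: idiomatic.


-- ===== PORT A =====
-- A's while loop: index i over the characters, accumulating `result`.
def stripA_go (cs : List Char) (i : Nat) (result : List Char) : List Char :=
  if h : i < cs.length then
    if cs[i] = '(' then
      stripA_go cs (i + 1) result
    else if cs[i] = ')' then
      stripA_go cs (i + 1) result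
    else if cs[i] = '\\' ∧ i + 1 < cs.length then
      stripA_go cs (i + 2) (result ++ [cs[i], cs[i + 1]!])
    else
      stripA_go cs (i + 1) (result ++ [cs[i]])
  else result
termination_by cs.length - i

def strip_capturing_groups (pattern : String) : String :=
  String.mk (stripA_go pattern.toList 0 [])

-- ===== PORT B =====
-- Hand-written, exact port of Source B's re.sub(r'\\.|[()]', repl, pattern, flags=DOTALL):
-- the scan tries the escape alternative '\\.' first (keeping the matched pair via the
-- function replacement), then '[()]' (replaced by ''); non-matching characters, including
-- a trailing lone backslash, are copied through unchanged.
def stripB_go : List Char → List Char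
  | [] => []
  | c :: rest =>
    if c = '\\' then
      match rest with
      | d :: rest' => '\\' :: d :: stripB_go rest'   -- '\\.' matched: repl keeps it
      | [] => ['\\']                                  -- lone trailing backslash: no match
    else if c = '(' ∨ c = ')' then
      stripB_go rest                                  -- '[()]' matched: repl returns ''
    else
      c :: stripB_go rest                             -- no match: copied through

def strip_capturing_groups_alt (pattern : String) : String :=
  String.mk (stripB_go pattern.toList)

-- ===== PRECONDITION & SPEC =====
def Spec_strip_capturing_groups (pattern : String) (out : String) : Prop := out = strip_capturing_groups_alt pattern
instance (pattern : String) (out : String) : Decidable (Spec_strip_capturing_groups pattern out) := by unfold Spec_strip_capturing_groups; infer_instance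

-- ===== CLAIM (what is proved, stated in full; the proofs are below) =====
def Claim_equal_strip_capturing_groups : Prop := ∀ (pattern : String), Dom_strip_capturing_groups pattern → Spec_strip_capturing_groups pattern (strip_capturing_groups pattern)

-- ===== LEMMAS AND PROOFS =====

theorem stripB_cons (c : Char) (rest : List Char) :
    stripB_go (c :: rest) =
      if c = '\\' then
        (match rest with
         | d :: rest' => '\\' :: d :: stripB_go rest'
         | [] => ['\\'])
      else if c = '(' ∨ c = ')' then stripB_go rest
      else c :: stripB_go rest := by
  rw [stripB_go.eq_def]

theorem stripA_eq_stripB (cs : List Char) (i : Nat) (result : List Char) :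
    stripA_go cs i result = result ++ stripB_go (cs.drop i) := by
  refine stripA_go.induct cs
    (motive := fun i result => stripA_go cs i result = result ++ stripB_go (cs.drop i))
    ?_ ?_ ?_ ?_ ?_ i result
  case _ =>
    intro i result h hp ih
    rw [stripA_go, dif_pos h, if_pos hp, ih, List.drop_eq_getElem_cons h, hp, stripB_cons]
    simp
  case _ =>
    intro i result h hp hq ih
    rw [stripA_go, dif_pos h, if_neg hp, if_pos hq, ih, List.drop_eq_getElem_cons h, hq, stripB_cons]
    simp
  case _ =>
    intro i result h hp hq hr ih
    obtain ⟨hbs, hlt⟩ := hr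
    rw [stripA_go, dif_pos h, if_neg hp, if_neg hq, if_pos ⟨hbs, hlt⟩, ih]
    rw [List.drop_eq_getElem_cons h, List.drop_eq_getElem_cons hlt, hbs, stripB_cons]
    simp [List.getElem!_eq_getElem?_getD, List.getElem?_eq_getElem hlt]
  case _ =>
    intro i result h hp hq hr ih
    rw [stripA_go, dif_pos h, if_neg hp, if_neg hq, if_neg hr, ih,
        List.drop_eq_getElem_cons h]
    by_cases hbs : cs[i] = '\\'
    · -- then i+1 ≥ length, so the tail is empty
      have hge : ¬ i + 1 < cs.length := fun hl => hr ⟨hbs, hl⟩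
      have : cs.drop (i + 1) = [] := List.drop_eq_nil_of_le (by omega)
      rw [this, hbs, stripB_cons]
      simp [stripB_go]
    · rw [stripB_cons, if_neg hbs, if_neg (by tauto)]
      simp
  case _ =>
    intro i result h
    rw [stripA_go, dif_neg h, List.drop_eq_nil_of_le (by omega)]
    simp [stripB_go]


-- ===== VERDICT (by name: the statement is the Claim_ definition above) =====
theorem strip_capturing_groups_spec : Claim_equal_strip_capturing_groups := by
  intro pattern _
  unfold Spec_strip_capturing_groups strip_capturing_groups strip_capturing_groups_alt
  rw [stripA_eq_stripB]
  simp
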